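-- pv_equiv track=rewrite | github.com/Nevi1/AdventOfCode2024 | puzzle5/puzzle5.py | is_breaking_rule
-- ===== SOURCE A (Python) =====
-- def is_breaking_rule(rule_dict: dict, manual: list[int]) -> bool:
--     for i in range(len(manual)):
--         for j in range(i + 1, len(manual)):
--             if manual[i] in rule_dict:
--                 for page in rule_dict[manual[i]]:
--                     if page == manual[j]:
--                         return True
--     return False
-- ===== SOURCE B (Python) =====
-- def is_breaking_rule(rule_dict: dict, manual: list[int]) -> bool:
--     # Single forward pass. 'wanted' accumulates every page that some already-passed
--     # page has a rule pointing to; the first page found in 'wanted' answers True.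
--     wanted = set()
--     for y in manual:
--         if y in wanted:
--             return True
--         wanted.update(rule_dict.get(y, ()))
--     return False
-- ===== Notes on version B (the rewrite author's own statement) =====
-- stated objective: faster
-- what changed: Replaced A's nested pairwise scan (for each earlier page, rescan its whole rule list against every later page) by one forward pass that accumulates the union of the passed pages' rule lists in a set and answers True at the first page found in that set.
import Mathlib
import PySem

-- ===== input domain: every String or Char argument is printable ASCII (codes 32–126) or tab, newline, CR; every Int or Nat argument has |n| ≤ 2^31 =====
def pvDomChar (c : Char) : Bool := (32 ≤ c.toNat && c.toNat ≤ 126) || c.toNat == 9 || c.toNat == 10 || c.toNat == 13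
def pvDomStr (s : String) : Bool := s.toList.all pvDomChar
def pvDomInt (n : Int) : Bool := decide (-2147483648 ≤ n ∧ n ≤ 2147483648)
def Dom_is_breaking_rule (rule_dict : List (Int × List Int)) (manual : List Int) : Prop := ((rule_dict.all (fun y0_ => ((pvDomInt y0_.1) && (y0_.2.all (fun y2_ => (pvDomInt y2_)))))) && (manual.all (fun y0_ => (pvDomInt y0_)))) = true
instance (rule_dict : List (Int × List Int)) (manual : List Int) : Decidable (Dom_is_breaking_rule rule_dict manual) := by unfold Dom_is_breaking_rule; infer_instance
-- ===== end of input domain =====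

-- B replaces A's nested pairwise scan by one forward pass accumulating a 'wanted' set (faster).


-- ===== PORT A =====
-- for i in range(len(manual)): for j in range(i+1, len(manual)):
--   if manual[i] in rule_dict: for page in rule_dict[manual[i]]: if page == manual[j]: return True
def is_breaking_rule (rule_dict : List (Int × List Int)) (manual : List Int) : Bool :=
  (PySem.List.pyRange 0 manual.length 1).any fun i =>
    (PySem.List.pyRange (i + 1) manual.length 1).any fun j =>
      match (PySem.Dict.mk rule_dict).get? (PySem.List.pyGetD manual i 0) with
      | none => false
      | some pages => pages.any fun page => page == PySem.List.pyGetD manual j 0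

-- ===== PORT B =====
-- wanted = set(); for y in manual: if y in wanted: return True; wanted.update(rule_dict.get(y, ()))
-- (the default () of rule_dict.get, only ever fed to set.update, is modelled as the empty list)
def pvScan (rule_dict : PySem.Dict Int (List Int)) : List Int → PySem.Set Int → Bool
  | [], _ => false
  | y :: rest, wanted =>
    if PySem.Set.contains wanted y then true
    else pvScan rule_dict rest (PySem.Set.update wanted ((rule_dict.get? y).getD []))

def is_breaking_rule_alt (rule_dict : List (Int × List Int)) (manual : List Int) : Bool :=
  pvScan (PySem.Dict.mk rule_dict) manual PySem.Set.empty

-- ===== PRECONDITION & SPEC =====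
def Spec_is_breaking_rule (rule_dict : List (Int × List Int)) (manual : List Int) (out : Bool) : Prop := out = is_breaking_rule_alt rule_dict manual
instance (rule_dict : List (Int × List Int)) (manual : List Int) (out : Bool) : Decidable (Spec_is_breaking_rule rule_dict manual out) := by unfold Spec_is_breaking_rule; infer_instance

-- ===== CLAIM (what is proved, stated in full; the proofs are below) =====
def Claim_equal_is_breaking_rule : Prop := ∀ (rule_dict : List (Int × List Int)) (manual : List Int), Dom_is_breaking_rule rule_dict manual → Spec_is_breaking_rule rule_dict manual (is_breaking_rule rule_dict manual)

-- ===== LEMMAS AND PROOFS =====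

-- the common meaning of both programs: some later page occurs in an earlier page's rule list
def pvBreaks (rule_dict : List (Int × List Int)) (manual : List Int) : Prop :=
  ∃ j, ∃ _ : j < manual.length, ∃ i, ∃ _ : i < j,
    manual[j] ∈ ((PySem.Dict.mk rule_dict).get? (manual[i]'(by omega))).getD []

theorem pvScan_iff (rule_dict : PySem.Dict Int (List Int)) :
    ∀ (l : List Int) (wanted : PySem.Set Int),
      pvScan rule_dict l wanted = true
        ↔ ∃ j, ∃ _ : j < l.length,
            l[j] ∈ (wanted : List Int) ∨
              ∃ x ∈ l.take j, l[j] ∈ (rule_dict.get? x).getD [] := by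
  intro l
  induction l with
  | nil => simp [pvScan]
  | cons y rest ih =>
    intro wanted
    simp only [pvScan]
    by_cases h : PySem.Set.contains wanted y = true
    · simp only [h, if_true, true_iff]
      exact ⟨0, by simp, Or.inl ((PySem.Set.contains_iff _ _).mp h)⟩
    · have hy : y ∉ (wanted : List Int) := fun hm => h ((PySem.Set.contains_iff _ _).mpr hm)
      rw [if_neg h, ih]
      constructor
      · rintro ⟨j, hj, hcase⟩
        refine ⟨j + 1, by simpa using hj, ?_⟩
        rcases hcase with hm | ⟨x, hx, hm⟩
        · rcases (PySem.Set.mem_update _ _ _).mp hm with hm | hm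
          · exact Or.inl (by simpa using hm)
          · exact Or.inr ⟨y, by simp, by simpa using hm⟩
        · exact Or.inr ⟨x, by simp [List.take_succ_cons, List.mem_cons, hx], by simpa using hm⟩
      · rintro ⟨j, hj, hcase⟩
        cases j with
        | zero =>
          rcases hcase with hm | ⟨x, hx, hm⟩
          · exact absurd (by simpa using hm) hy
          · simp at hx
        | succ j =>
          refine ⟨j, by simpa using hj, ?_⟩
          rcases hcase with hm | ⟨x, hx, hm⟩
          · exact Or.inl ((PySem.Set.mem_update _ _ _).mpr (Or.inl (by simpa using hm)))
          · rcases (List.mem_cons.mp (by simpa [List.take_succ_cons] using hx)) with rfl | hx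
            · exact Or.inl ((PySem.Set.mem_update _ _ _).mpr (Or.inr (by simpa using hm)))
            · exact Or.inr ⟨x, hx, by simpa using hm⟩

theorem pvAlt_iff (rule_dict : List (Int × List Int)) (manual : List Int) :
    is_breaking_rule_alt rule_dict manual = true ↔ pvBreaks rule_dict manual := by
  unfold is_breaking_rule_alt pvBreaks
  rw [pvScan_iff]
  constructor
  · rintro ⟨j, hj, hcase⟩
    rcases hcase with hm | ⟨x, hx, hm⟩
    · simp [PySem.Set.empty] at hm
    · obtain ⟨i, hi, hx⟩ := List.mem_take_iff_getElem.mp hx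
      exact ⟨j, hj, i, by omega, by rw [show manual[i]'(by omega) = x from by simpa using hx]; exact hm⟩
  · rintro ⟨j, hj, i, hij, hm⟩
    refine ⟨j, hj, Or.inr ⟨manual[i]'(by omega), ?_, hm⟩⟩
    exact List.mem_take_iff_getElem.mpr ⟨i, by omega, by simp⟩

theorem pvA_iff (rule_dict : List (Int × List Int)) (manual : List Int) :
    is_breaking_rule rule_dict manual = true ↔ pvBreaks rule_dict manual := by
  unfold is_breaking_rule pvBreaks
  simp only [List.any_eq_true, PySem.List.mem_pyRange_one]
  constructor
  · rintro ⟨i, ⟨hi0, hi⟩, j, ⟨hj0, hj⟩, hmatch⟩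
    obtain ⟨i', rfl⟩ : ∃ i' : ℕ, i = (i' : Int) := ⟨i.toNat, (Int.toNat_of_nonneg hi0).symm⟩
    obtain ⟨j', rfl⟩ : ∃ j' : ℕ, j = (j' : Int) := ⟨j.toNat, (Int.toNat_of_nonneg (by omega)).symm⟩
    have hi' : i' < manual.length := by exact_mod_cast hi
    have hj' : j' < manual.length := by exact_mod_cast hj
    have hij : i' < j' := by exact_mod_cast hj0
    have hgi : PySem.List.pyGetD manual (i' : Int) 0 = manual[i'] := by
      simp [List.getD_eq_getElem?_getD, List.getElem?_eq_getElem hi']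
    have hgj : PySem.List.pyGetD manual (j' : Int) 0 = manual[j'] := by
      simp [List.getD_eq_getElem?_getD, List.getElem?_eq_getElem hj']
    refine ⟨j', hj', i', hij, ?_⟩
    rcases hget : (PySem.Dict.mk rule_dict).get? (manual[i']'(by omega)) with _ | pages
    · rw [hgi, hget] at hmatch; simp at hmatch
    · rw [hgi, hget] at hmatch
      simp only [List.any_eq_true, beq_iff_eq] at hmatch
      obtain ⟨page, hpg, hpe⟩ := hmatch
      simpa using (hgj ▸ hpe) ▸ hpg
  · rintro ⟨j, hj, i, hij, hm⟩
    have hi : i < manual.length := by omega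
    refine ⟨(i : Int), ⟨by omega, by exact_mod_cast hi⟩,
      (j : Int), ⟨by exact_mod_cast hij, by exact_mod_cast hj⟩, ?_⟩
    have hgi : PySem.List.pyGetD manual (i : Int) 0 = manual[i] := by
      simp [List.getD_eq_getElem?_getD, List.getElem?_eq_getElem hi]
    have hgj : PySem.List.pyGetD manual (j : Int) 0 = manual[j] := by
      simp [List.getD_eq_getElem?_getD, List.getElem?_eq_getElem hj]
    rcases hget : (PySem.Dict.mk rule_dict).get? (manual[i]'(by omega)) with _ | pages
    · rw [hget] at hm; simp at hm
    · rw [hget] at hm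
      rw [hgi, hget]
      simp only [List.any_eq_true, beq_iff_eq]
      exact ⟨manual[j], by simpa using hm, hgj.symm⟩

-- ===== VERDICT (by name: the statement is the Claim_ definition above) =====
theorem is_breaking_rule_spec : Claim_equal_is_breaking_rule := by
  intro rule_dict manual _
  unfold Spec_is_breaking_rule
  rw [Bool.eq_iff_iff, pvA_iff, pvAlt_iff]
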